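-- pv_equiv track=rewrite | github.com/stolati/slant_online | server/slant_server/puzzle.py | extract_problem
-- ===== SOURCE A (Python) =====
-- def extract_problem(problem):
--     ord_0 = ord('0')
--     ord_4 = ord('4')
--
--     ord_a = ord('a')
--     ord_z = ord('z')
--
--     res = []
--
--     for c in problem:
--         ord_c = ord(c)
--         if c in {'0', '1', '2', '3', '4'}:
--             res.append(c)
--             continue
--         if ord_a <= ord_c <= ord_z:
--             res.append(' ' * (ord_c - (ord_a - 1)))
--             continue
--
--     return ''.join(res)
-- ===== SOURCE B (Python) =====
-- def extract_problem(problem):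
--     table = {}
--     for c in set(problem):
--         o = ord(c)
--         if '0' <= c <= '4':
--             table[o] = c
--         elif 'a' <= c <= 'z':
--             table[o] = ' ' * (o - 96)
--         else:
--             table[o] = None
--     return problem.translate(table)
-- ===== Notes on version B (the rewrite author's own statement) =====
-- stated objective: idiomatic
-- what changed: Replaces A's explicit per-character accumulator loop (append then ''.join) with building a translation table over the distinct characters once and applying it in a single str.translate call.
import Mathlib
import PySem

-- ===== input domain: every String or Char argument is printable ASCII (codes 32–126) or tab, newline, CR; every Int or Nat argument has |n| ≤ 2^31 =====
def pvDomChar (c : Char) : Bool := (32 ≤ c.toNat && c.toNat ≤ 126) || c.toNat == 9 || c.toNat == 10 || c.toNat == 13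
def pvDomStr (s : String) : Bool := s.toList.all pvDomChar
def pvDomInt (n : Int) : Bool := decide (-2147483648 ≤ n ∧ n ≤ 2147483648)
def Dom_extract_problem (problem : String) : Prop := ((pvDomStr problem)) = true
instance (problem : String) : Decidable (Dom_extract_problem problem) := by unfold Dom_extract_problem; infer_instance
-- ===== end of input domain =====

-- B replaces A's explicit accumulator loop by building a translation table over the
-- distinct characters once and applying it in a single translate pass (idiomatic; same cost).

-- ===== PORT A =====
-- literal port of A: loop over the characters, appending the kept piece to `res`, then ''.join(res)
def extract_problem (problem : String) : String :=
  let res : List String := problem.toList.foldl (fun res c =>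
    let ord_c := c.toNat
    if c = '0' ∨ c = '1' ∨ c = '2' ∨ c = '3' ∨ c = '4' then
      res ++ [String.ofList [c]]
    else if 97 ≤ ord_c ∧ ord_c ≤ 122 then
      res ++ [String.ofList (List.replicate (ord_c - 96) ' ')]   -- ' ' * (ord_c - (ord_a - 1))
    else res) []
  PySem.Str.join "" res

-- ===== PORT B =====
-- the table entry Source B stores for a character (None → Option.none deletes it)
def pvTransEntry (c : Char) : Option String :=
  if '0' ≤ c ∧ c ≤ '4' then some (String.ofList [c])
  else if 'a' ≤ c ∧ c ≤ 'z' then some (String.ofList (List.replicate (c.toNat - 96) ' '))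
  else none

-- port of B: build the dict keyed by code point over set(problem), then problem.translate(table);
-- str.translate ported by hand: look each character up by code point — a mapped string replaces it,
-- a mapped None deletes it, an unmapped character is kept unchanged (exact on this domain)
def extract_problem_alt (problem : String) : String :=
  let table : PySem.Dict Nat (Option String) :=
    (PySem.Set.ofList problem.toList).foldl
      (fun d c => d.insert c.toNat (pvTransEntry c)) PySem.Dict.empty
  PySem.Str.join "" (problem.toList.map (fun c =>
    match table.get? c.toNat with
    | some (some s) => s
    | some none => ""
    | none => String.ofList [c]))

-- ===== PRECONDITION & SPEC =====
def Spec_extract_problem (problem : String) (out : String) : Prop := out = extract_problem_alt problem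
instance (problem : String) (out : String) : Decidable (Spec_extract_problem problem out) := by unfold Spec_extract_problem; infer_instance

-- ===== CLAIM (what is proved, stated in full; the proofs are below) =====
def Claim_equal_extract_problem : Prop := ∀ (problem : String), Dom_extract_problem problem → Spec_extract_problem problem (extract_problem problem)

-- ===== LEMMAS AND PROOFS =====

theorem pv_char_toNat_inj {a b : Char} (h : a.toNat = b.toNat) : a = b := by
  apply Char.ext; exact UInt32.toNat_inj.mp h

theorem pv_char_le_iff (a b : Char) : a ≤ b ↔ a.toNat ≤ b.toNat := by
  rw [Char.le_def, UInt32.le_iff_toNat_le]; exact Iff.rfl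

-- the characters A keeps, as the piece A appends (empty list = nothing appended)
def pvPieceA (c : Char) : List String :=
  if c = '0' ∨ c = '1' ∨ c = '2' ∨ c = '3' ∨ c = '4' then [String.ofList [c]]
  else if 97 ≤ c.toNat ∧ c.toNat ≤ 122 then [String.ofList (List.replicate (c.toNat - 96) ' ')]
  else []

theorem pvPieceA_eq (c : Char) :
    pvPieceA c = match pvTransEntry c with
      | some s => [s]
      | none => [] := by
  unfold pvPieceA pvTransEntry
  have h0 : ('0' ≤ c ∧ c ≤ '4') ↔ (c = '0' ∨ c = '1' ∨ c = '2' ∨ c = '3' ∨ c = '4') := by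
    constructor
    · rintro ⟨h1, h2⟩
      rw [pv_char_le_iff] at h1 h2
      rw [show '0'.toNat = 48 from rfl] at h1
      rw [show '4'.toNat = 52 from rfl] at h2
      have : c.toNat = 48 ∨ c.toNat = 49 ∨ c.toNat = 50 ∨ c.toNat = 51 ∨ c.toNat = 52 := by omega
      rcases this with h | h | h | h | h
      · exact Or.inl (pv_char_toNat_inj h)
      · exact Or.inr (Or.inl (pv_char_toNat_inj h))
      · exact Or.inr (Or.inr (Or.inl (pv_char_toNat_inj h)))
      · exact Or.inr (Or.inr (Or.inr (Or.inl (pv_char_toNat_inj h))))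
      · exact Or.inr (Or.inr (Or.inr (Or.inr (pv_char_toNat_inj h))))
    · rintro (rfl | rfl | rfl | rfl | rfl) <;> exact ⟨by decide, by decide⟩
  have hl : ('a' ≤ c ∧ c ≤ 'z') ↔ (97 ≤ c.toNat ∧ c.toNat ≤ 122) := by
    rw [pv_char_le_iff, pv_char_le_iff,
      show 'a'.toNat = 97 from rfl, show 'z'.toNat = 122 from rfl]
  simp only [h0, hl]
  split_ifs <;> rfl

-- A's loop accumulates exactly the flatMap of pvPieceA
theorem pvA_foldl (cs : List Char) (acc : List String) :
    cs.foldl (fun res c =>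
      let ord_c := c.toNat
      if c = '0' ∨ c = '1' ∨ c = '2' ∨ c = '3' ∨ c = '4' then
        res ++ [String.ofList [c]]
      else if 97 ≤ ord_c ∧ ord_c ≤ 122 then
        res ++ [String.ofList (List.replicate (ord_c - 96) ' ')]
      else res) acc = acc ++ cs.flatMap pvPieceA := by
  induction cs generalizing acc with
  | nil => simp
  | cons c cs ih =>
    simp only [List.foldl_cons, List.flatMap_cons, ih]
    unfold pvPieceA
    split_ifs <;> simp

-- the built table answers pvTransEntry on every character of the build list
theorem pv_table_get (s : List Char) (d : PySem.Dict Nat (Option String)) (x : Char) :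
    ((s.foldl (fun d c => d.insert c.toNat (pvTransEntry c)) d).get? x.toNat) =
      if x ∈ s then some (pvTransEntry x) else d.get? x.toNat := by
  induction s generalizing d with
  | nil => simp
  | cons c s ih =>
    simp only [List.foldl_cons, ih, List.mem_cons]
    by_cases hs : x ∈ s
    · simp [hs]
    · by_cases hc : x = c
      · subst hc; simp [hs, PySem.Dict.get?_insert_self]
      · have hne : x.toNat ≠ c.toNat := fun h => hc (pv_char_toNat_inj h)
        simp [hs, hc, PySem.Dict.get?_insert_of_ne _ _ hne]

-- join with the empty separator is flatten
theorem pv_join_nil (l : List (List Char)) : PySem.Chars.join [] l = l.flatten := by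
  induction l with
  | nil => simp [PySem.Chars.join_nil]
  | cons p rest ih =>
    cases rest with
    | nil => simp [PySem.Chars.join, List.intercalate]
    | cons q rest' => rw [PySem.Chars.join_cons_cons, ih]; simp

-- the joined character lists agree once the table answers pvTransEntry on every character
theorem pv_main (t : PySem.Dict Nat (Option String)) (cs : List Char)
    (h : ∀ c ∈ cs, t.get? c.toNat = some (pvTransEntry c)) :
    ((cs.flatMap pvPieceA).map String.toList).flatten =
      ((cs.map (fun c =>
        match t.get? c.toNat with
        | some (some s) => s
        | some none => ""
        | none => String.ofList [c])).map String.toList).flatten := by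
  induction cs with
  | nil => simp
  | cons c cs ih =>
    simp only [List.flatMap_cons, List.map_append, List.flatten_append, List.map_cons,
      List.flatten_cons]
    rw [ih (fun x hx => h x (List.mem_cons_of_mem _ hx))]
    congr 1
    rw [h c (List.mem_cons_self), pvPieceA_eq]
    cases pvTransEntry c <;> simp

theorem extract_problem_eq_alt (problem : String) :
    extract_problem problem = extract_problem_alt problem := by
  unfold extract_problem extract_problem_alt
  simp only [pvA_foldl, List.nil_append, PySem.Str.join]
  congr 1
  rw [show ("".toList) = ([] : List Char) from rfl, pv_join_nil, pv_join_nil]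
  exact pv_main _ _ (fun c hc => by
    rw [pv_table_get]
    simp [(PySem.Set.mem_ofList _ _).mpr hc])

-- ===== VERDICT (by name: the statement is the Claim_ definition above) =====
theorem extract_problem_spec : Claim_equal_extract_problem := by
  intro problem _
  unfold Spec_extract_problem
  exact extract_problem_eq_alt problem
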